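-- pv_equiv track=rewrite | github.com/whitevamp/ETS2_skin_pak_creation | paintjob-packer-master/library/paintjob.py | contains_reserved_file_name
-- ===== SOURCE A (Python) =====
-- def contains_reserved_file_name(string_input):
--     reserved_names = ["CON","PRN","AUX","NUL"]
--     for i in range(9):
--         reserved_names.append("COM" + str(i+1))
--         reserved_names.append("LPT" + str(i+1))
--     any_found = False
--     for word in reserved_names:
--         if string_input.upper() == word:
--             any_found = True
--     return any_found
-- ===== SOURCE B (Python) =====
-- def contains_reserved_file_name(string_input):
--     u = string_input.upper()
--     if u in ("CON", "PRN", "AUX", "NUL"):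
--         return True
--     return len(u) == 4 and u[:3] in ("COM", "LPT") and u[3] in "123456789"
-- ===== Notes on version B (the rewrite author's own statement) =====
-- stated objective: simpler
-- what changed: B classifies the uppercased string by structure (one of the four base names, or exactly 4 chars = COM/LPT plus a digit 1-9) instead of building a 22-entry table in a loop and scanning all of it.
import Mathlib
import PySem

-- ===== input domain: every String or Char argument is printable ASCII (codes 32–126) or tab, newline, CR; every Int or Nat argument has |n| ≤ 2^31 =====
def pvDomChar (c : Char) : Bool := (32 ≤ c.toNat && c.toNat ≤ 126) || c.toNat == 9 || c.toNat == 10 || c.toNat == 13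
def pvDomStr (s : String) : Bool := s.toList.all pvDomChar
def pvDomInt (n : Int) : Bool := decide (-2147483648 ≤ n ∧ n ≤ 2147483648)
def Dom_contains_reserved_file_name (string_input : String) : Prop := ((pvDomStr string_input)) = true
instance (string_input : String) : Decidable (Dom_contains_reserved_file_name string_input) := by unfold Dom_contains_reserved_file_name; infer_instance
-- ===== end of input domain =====

-- B checks the uppercased string's structure (a base name, or COM/LPT plus one digit 1-9)
-- instead of A's loop that builds a 22-entry table and scans all of it (objective: simpler).

-- ===== PORT A =====
def contains_reserved_file_name (string_input : String) : Bool :=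
  let reserved_names : List String := ["CON", "PRN", "AUX", "NUL"]
  let reserved_names :=
    (PySem.List.pyRange 0 9 1).foldl
      (fun acc i => (acc ++ ["COM" ++ PySem.Int.toStr (i + 1)]) ++ ["LPT" ++ PySem.Int.toStr (i + 1)])
      reserved_names
  reserved_names.foldl
    (fun any_found word => if PySem.Str.upper string_input == word then true else any_found)
    false

-- ===== PORT B =====
def contains_reserved_file_name_alt (string_input : String) : Bool :=
  let u := PySem.Str.upper string_input
  if u == "CON" || u == "PRN" || u == "AUX" || u == "NUL" then
    true
  else
    (PySem.Str.len u == 4)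
      && (PySem.Str.slice u none (some 3) == "COM" || PySem.Str.slice u none (some 3) == "LPT")
      -- Python's `u[3] in "123456789"`: u[3] is one character (an IndexError cannot happen,
      -- since Python's `and` short-circuits after len(u) == 4), so the substring test is
      -- exactly membership of that character among the nine digit characters (exact port).
      && (match PySem.Str.pyGet? u 3 with
          | some c => "123456789".toList.contains c
          | none => false)

-- ===== PRECONDITION & SPEC =====
def Spec_contains_reserved_file_name (string_input : String) (out : Bool) : Prop := out = contains_reserved_file_name_alt string_input
instance (string_input : String) (out : Bool) : Decidable (Spec_contains_reserved_file_name string_input out) := by unfold Spec_contains_reserved_file_name; infer_instance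

-- ===== CLAIM (what is proved, stated in full; the proofs are below) =====
def Claim_equal_contains_reserved_file_name : Prop := ∀ (string_input : String), Dom_contains_reserved_file_name string_input → Spec_contains_reserved_file_name string_input (contains_reserved_file_name string_input)

-- ===== LEMMAS AND PROOFS =====

-- the 22 reserved names A's construction loop produces, as a literal list
def pvL22 : List String :=
  ["CON", "PRN", "AUX", "NUL",
   "COM1", "LPT1", "COM2", "LPT2", "COM3", "LPT3", "COM4", "LPT4", "COM5", "LPT5",
   "COM6", "LPT6", "COM7", "LPT7", "COM8", "LPT8", "COM9", "LPT9"]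

lemma pv_reserved_eq :
    (PySem.List.pyRange 0 9 1).foldl
      (fun acc i => (acc ++ ["COM" ++ PySem.Int.toStr (i + 1)]) ++ ["LPT" ++ PySem.Int.toStr (i + 1)])
      ["CON", "PRN", "AUX", "NUL"] = pvL22 := by decide

lemma pv_fold_any (u : String) (L : List String) (b : Bool) :
    L.foldl (fun any_found word => if u == word then true else any_found) b
      = (b || L.any fun w => u == w) := by
  induction L generalizing b with
  | nil => simp
  | cons w L ih =>
    rw [List.foldl_cons, ih]
    cases h : (u == w) <;> simp [h, List.any_cons]

lemma pv_mem_map_toList (u : String) (h : u.toList ∈ pvL22.map String.toList) :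
    (pvL22.any fun w => u == w) = true := by
  simp only [List.mem_map] at h
  obtain ⟨w, hw, hwt⟩ := h
  have hu : u = w := String.toList_inj.mp hwt.symm
  subst hu
  simp only [List.any_eq_true]
  exact ⟨u, hw, by simp⟩

lemma pv_core (u : String) :
    (pvL22.any fun w => u == w) =
      (if u == "CON" || u == "PRN" || u == "AUX" || u == "NUL" then
        true
      else
        (PySem.Str.len u == 4)
          && (PySem.Str.slice u none (some 3) == "COM" || PySem.Str.slice u none (some 3) == "LPT")
          && (match PySem.Str.pyGet? u 3 with
              | some c => "123456789".toList.contains c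
              | none => false)) := by
  rw [Bool.eq_iff_iff]
  constructor
  · intro h
    obtain ⟨w, hw, hb⟩ := List.any_eq_true.mp h
    have hu : u = w := eq_of_beq hb
    subst hu
    fin_cases hw <;> decide
  · intro h
    by_cases hbase : (u == "CON" || u == "PRN" || u == "AUX" || u == "NUL") = true
    · simp only [Bool.or_eq_true, beq_iff_eq] at hbase
      rcases hbase with ((hb | hb) | hb) | hb <;> subst hb <;> decide
    · rw [if_neg hbase] at h
      simp only [Bool.and_eq_true, Bool.or_eq_true, beq_iff_eq] at h
      obtain ⟨⟨hlen, hpre⟩, hdig⟩ := h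
      simp only [PySem.Str.len] at hlen
      have hsl : (PySem.Str.slice u none (some 3)).toList = u.toList.take 3 := by
        simp [PySem.Str.toList_slice, PySem.List.slice_to]
      have hpre' : u.toList.take 3 = "COM".toList ∨ u.toList.take 3 = "LPT".toList := by
        rcases hpre with hp | hp
        · exact Or.inl (by rw [← hsl]; exact congrArg String.toList hp)
        · exact Or.inr (by rw [← hsl]; exact congrArg String.toList hp)
      rw [show "COM".toList = ['C', 'O', 'M'] from by decide,
          show "LPT".toList = ['L', 'P', 'T'] from by decide] at hpre'
      obtain ⟨a, b, c, d, hu'⟩ : ∃ a b c d, u.toList = [a, b, c, d] := by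
        rcases hL : u.toList with _ | ⟨a, _ | ⟨b, _ | ⟨c, _ | ⟨d, _ | ⟨e, t⟩⟩⟩⟩⟩ <;>
          rw [hL] at hlen <;>
            simp only [List.length_cons, List.length_nil] at hlen <;>
              first
                | exact ⟨_, _, _, _, rfl⟩
                | (exfalso; omega)
      have hget : PySem.Str.pyGet? u 3 = some d := by
        have h1 : PySem.Str.pyGet? u 3 = PySem.List.pyGet? u.toList 3 := by simp
        rw [h1, hu']
        simp [PySem.List.pyGet?, PySem.List.pyIdx?]
      rw [hget] at hdig
      simp only [show "123456789".toList = ['1','2','3','4','5','6','7','8','9'] from by decide,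
        List.contains_eq_mem, List.mem_cons, List.not_mem_nil, or_false, decide_eq_true_eq] at hdig
      rw [hu'] at hpre'
      simp only [List.take_succ_cons, List.take_zero, List.cons.injEq, and_true] at hpre'
      rcases hpre' with ⟨ha, hb, hc⟩ | ⟨ha, hb, hc⟩ <;>
        rcases hdig with hd | hd | hd | hd | hd | hd | hd | hd | hd <;>
          (subst ha; subst hb; subst hc; subst hd;
           apply pv_mem_map_toList; rw [hu']; decide)

-- ===== VERDICT (by name: the statement is the Claim_ definition above) =====
theorem contains_reserved_file_name_spec : Claim_equal_contains_reserved_file_name := by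
  intro s _
  unfold Spec_contains_reserved_file_name
  simp only [contains_reserved_file_name, contains_reserved_file_name_alt]
  rw [pv_reserved_eq, pv_fold_any, Bool.false_or, pv_core]
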